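-- pv_equiv track=rewrite | github.com/Prompthon-IO/agentic-lab | scripts/check_filename_casing.py | find_case_conflicts
-- ===== SOURCE A (Python) =====
-- from collections import defaultdict
--
-- def find_case_conflicts(paths: list[str]) -> dict[str, list[str]]:
--     grouped: dict[str, list[str]] = defaultdict(list)
--     for path in paths:
--         grouped[path.lower()].append(path)
--     return {
--         normalized: variants
--         for normalized, variants in grouped.items()
--         if len(variants) > 1
--     }
-- ===== SOURCE B (Python) =====
-- def find_case_conflicts(paths: list[str]) -> dict[str, list[str]]:
--     # Partition-based: no grouping dict at all.  Repeatedly take the lowercase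
--     # key of the first remaining path, split the remaining list into that key's
--     # variants and the rest, and emit the variant list when it has >1 element.
--     out: dict[str, list[str]] = {}
--     rest = paths
--     while rest:
--         k = rest[0].lower()
--         same = [p for p in rest if p.lower() == k]
--         if len(same) > 1:
--             out[k] = same
--         rest = [p for p in rest if p.lower() != k]
--     return out
-- ===== Notes on version B (the rewrite author's own statement) =====
-- stated objective: alternative
-- what changed: B drops the grouping dictionary entirely and instead repeatedly partitions the remaining list on the lowercase key of its first element (quicksort-partition style), emitting each extracted variant group directly when it has more than one member.
import Mathlib
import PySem

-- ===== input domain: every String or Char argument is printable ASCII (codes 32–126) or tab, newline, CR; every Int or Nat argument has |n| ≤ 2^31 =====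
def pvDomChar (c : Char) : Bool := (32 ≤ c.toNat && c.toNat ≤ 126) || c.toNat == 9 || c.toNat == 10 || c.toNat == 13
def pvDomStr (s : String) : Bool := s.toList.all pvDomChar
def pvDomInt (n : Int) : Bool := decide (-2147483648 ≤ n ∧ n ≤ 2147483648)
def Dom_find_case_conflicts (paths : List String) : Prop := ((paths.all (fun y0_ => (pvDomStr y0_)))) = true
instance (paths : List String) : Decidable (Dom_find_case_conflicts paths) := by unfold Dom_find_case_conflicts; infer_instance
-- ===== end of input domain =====

-- B replaces A's dict-bucketing-then-filter with a partition loop that repeatedly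
-- extracts all case variants of the first remaining path (objective: alternative).

-- ===== PORT A =====
def find_case_conflicts (paths : List String) : List (String × List String) :=
  let grouped : PySem.Dict String (List String) :=
    paths.foldl (fun d path => d.modify (PySem.Str.lower path) [] (fun v => v ++ [path]))
      PySem.Dict.empty
  -- dict comprehension over grouped.items keeping entries with len(variants) > 1
  (grouped.items.foldl
      (fun r kv => if 1 < kv.2.length then r.insert kv.1 kv.2 else r)
      (PySem.Dict.empty : PySem.Dict String (List String))).items

-- ===== PORT B =====
-- the while loop: state (out, rest); each iteration partitions rest on the
-- lowercase key of its first element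
def pvBLoop (out : PySem.Dict String (List String)) (rest : List String) :
    PySem.Dict String (List String) :=
  match rest with
  | [] => out
  | p :: t =>
    let k := PySem.Str.lower p
    let same := (p :: t).filter (fun q => PySem.Str.lower q == k)
    let out' := if 1 < same.length then out.insert k same else out
    pvBLoop out' ((p :: t).filter (fun q => !(PySem.Str.lower q == k)))
termination_by rest.length
decreasing_by
  simp only [List.filter_cons, beq_self_eq_true, Bool.not_true, Bool.false_eq_true,
    if_false, List.length_cons]
  have := List.length_filter_le (fun q => !(PySem.Str.lower q == PySem.Str.lower p)) t
  omega

def find_case_conflicts_alt (paths : List String) : List (String × List String) :=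
  (pvBLoop PySem.Dict.empty paths).items

-- ===== PRECONDITION & SPEC =====
def Spec_find_case_conflicts (paths : List String) (out : List (String × List String)) : Prop := out = find_case_conflicts_alt paths
instance (paths : List String) (out : List (String × List String)) : Decidable (Spec_find_case_conflicts paths out) := by unfold Spec_find_case_conflicts; infer_instance

-- ===== CLAIM (what is proved, stated in full; the proofs are below) =====
def Claim_equal_find_case_conflicts : Prop := ∀ (paths : List String), Dom_find_case_conflicts paths → Spec_find_case_conflicts paths (find_case_conflicts paths)

-- ===== LEMMAS AND PROOFS =====

-- the common characterisation: distinct lowercase keys in first-occurrence order,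
-- each paired with the variants it groups, keeping only groups of length > 1
def pvG (l : List String) : List (String × List String) :=
  ((PySem.Set.ofList (l.map PySem.Str.lower)).map
      (fun k => (k, l.filter (fun p => PySem.Str.lower p == k)))).filter
    (fun kv => 1 < kv.2.length)

-- ---------- A-side: find_case_conflicts = pvG ----------

def pvGroup (l : List String) : PySem.Dict String (List String) :=
  l.foldl (fun d p => d.modify (PySem.Str.lower p) [] (fun v => v ++ [p])) PySem.Dict.empty

lemma pvGroup_keys (l : List String) :
    (pvGroup l).keys = PySem.Set.ofList (l.map PySem.Str.lower) := by
  unfold pvGroup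
  rw [PySem.Dict.keys_foldl_modify_key (f := fun _ p => (fun v => v ++ [p]))]
  simp [PySem.Set.update_nil_left]

lemma pvGroup_keys_nodup (l : List String) : (pvGroup l).keys.Nodup := by
  unfold pvGroup
  exact PySem.Dict.nodup_keys_foldl_modify_key l PySem.Str.lower [] (fun _ p => (fun v => v ++ [p])) _ (by simp)

lemma pvGroup_getD (l : List String) (k : String) :
    (pvGroup l).getD k [] = l.filter (fun p => PySem.Str.lower p == k) := by
  unfold pvGroup
  rw [← List.foldl_map (f := fun p => (PySem.Str.lower p, p))
      (g := fun (d : PySem.Dict String (List String)) (q : String × String) => d.modify q.1 [] (fun v => v ++ [q.2]))]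
  rw [PySem.Dict.getD_foldl_modify_append]
  simp only [List.filter_map, List.map_map]
  simp [Function.comp_def]

lemma pvGroup_items (l : List String) :
    (pvGroup l).items
      = (PySem.Set.ofList (l.map PySem.Str.lower)).map
          (fun k => (k, l.filter (fun p => PySem.Str.lower p == k))) := by
  rw [PySem.Dict.items_eq_map_keys (pvGroup l) (pvGroup_keys_nodup l) ([] : List String),
    pvGroup_keys]
  exact List.map_congr_left (fun k _ => by rw [pvGroup_getD])

lemma pvComp_items (l : List (String × List String)) (h : (l.map Prod.fst).Nodup) :
    (l.foldl (fun r kv => if 1 < kv.2.length then r.insert kv.1 kv.2 else r)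
        (PySem.Dict.empty : PySem.Dict String (List String))).items
      = l.filter (fun kv => 1 < kv.2.length) := by
  have hb : ∀ (r : PySem.Dict String (List String)) (kv : String × List String),
      (if 1 < kv.2.length then r.insert kv.1 kv.2 else r)
        = (if (fun kv : String × List String => decide (1 < kv.2.length)) kv = true
            then r.insert kv.1 kv.2 else r) := by
    intro r kv; simp
  simp only [hb]
  rw [← List.foldl_filter]
  have := PySem.Dict.items_foldl_insert_fresh
      (l.filter (fun kv : String × List String => decide (1 < kv.2.length)))
      Prod.fst Prod.snd (PySem.Dict.empty : PySem.Dict String (List String))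
      (by intro a _; simp) (h.sublist (List.Sublist.map Prod.fst List.filter_sublist))
  rw [this]
  simp [show (PySem.Dict.empty : PySem.Dict String (List String)).items = [] from rfl]

lemma pvA_eq_G (paths : List String) : find_case_conflicts paths = pvG paths := by
  show ((pvGroup paths).items.foldl
      (fun r kv => if 1 < kv.2.length then r.insert kv.1 kv.2 else r)
      (PySem.Dict.empty : PySem.Dict String (List String))).items = pvG paths
  rw [pvComp_items _ (by simpa [PySem.Dict.keys] using pvGroup_keys_nodup paths),
    pvGroup_items]
  rfl

-- ---------- B-side: find_case_conflicts_alt = pvG ----------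

-- Set.ofList with the head element pulled out
lemma pvFoldl_add_cons {α : Type} [BEq α] [LawfulBEq α] (k : α) (m s : List α) :
    List.foldl PySem.Set.add (k :: s) m
      = k :: List.foldl PySem.Set.add s (m.filter (fun x => !(x == k))) := by
  induction m generalizing s with
  | nil => rfl
  | cons x m ih =>
    simp only [List.foldl_cons, List.filter_cons]
    by_cases hx : x = k
    · subst hx
      simp only [beq_self_eq_true, Bool.not_true]
      rw [show PySem.Set.add (x :: s) x = x :: s by
        simp]
      exact ih s
    · have hne : (x == k) = false := by simp [hx]
      simp only [hne, Bool.not_false]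
      rw [show PySem.Set.add (k :: s) x = k :: PySem.Set.add s x by
        simp only [PySem.Set.add_eq_ite]
        by_cases hm : x ∈ s
        · simp [hm, hx]
        · simp [hm, hx]]
      exact ih (PySem.Set.add s x)

lemma pvOfList_cons_head {α : Type} [BEq α] [LawfulBEq α] (k : α) (m : List α) :
    PySem.Set.ofList (k :: m) = k :: PySem.Set.ofList (m.filter (fun x => !(x == k))) := by
  rw [PySem.Set.ofList_eq_foldl, PySem.Set.ofList_eq_foldl]
  simpa using pvFoldl_add_cons k m []

-- the partition step of pvG
lemma pvG_step (p : String) (t : List String) :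
    pvG (p :: t)
      = (if 1 < ((p :: t).filter (fun q => PySem.Str.lower q == PySem.Str.lower p)).length
          then [(PySem.Str.lower p,
                 (p :: t).filter (fun q => PySem.Str.lower q == PySem.Str.lower p))]
          else [])
        ++ pvG ((p :: t).filter (fun q => !(PySem.Str.lower q == PySem.Str.lower p))) := by
  have hl' : (p :: t).filter (fun q => !(PySem.Str.lower q == PySem.Str.lower p))
      = t.filter (fun q => !(PySem.Str.lower q == PySem.Str.lower p)) := by
    simp [List.filter_cons]
  unfold pvG
  rw [hl']
  have hmap : (t.filter (fun q => !(PySem.Str.lower q == PySem.Str.lower p))).map PySem.Str.lower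
      = (t.map PySem.Str.lower).filter (fun x => !(x == PySem.Str.lower p)) := by
    rw [List.filter_map]
    rfl
  rw [hmap]
  have hofl : PySem.Set.ofList ((p :: t).map PySem.Str.lower)
      = PySem.Str.lower p
        :: PySem.Set.ofList ((t.map PySem.Str.lower).filter (fun x => !(x == PySem.Str.lower p))) := by
    simp only [List.map_cons]
    exact pvOfList_cons_head _ _
  rw [hofl, List.map_cons, List.filter_cons]
  have hgroups : ∀ k ∈ PySem.Set.ofList
        ((t.map PySem.Str.lower).filter (fun x => !(x == PySem.Str.lower p))),
      (p :: t).filter (fun q => PySem.Str.lower q == k)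
        = (t.filter (fun q => !(PySem.Str.lower q == PySem.Str.lower p))).filter
            (fun q => PySem.Str.lower q == k) := by
    intro k hk
    have hne : k ≠ PySem.Str.lower p := by
      have := (List.mem_filter.mp ((PySem.Set.mem_ofList _ _).mp hk)).2
      simpa using this
    rw [List.filter_filter]
    have hhead : (PySem.Str.lower p == k) = false := beq_eq_false_iff_ne.mpr (Ne.symm hne)
    rw [List.filter_cons, hhead]
    simp only [Bool.false_eq_true, if_false]
    apply List.filter_congr
    intro q _
    cases hq : (PySem.Str.lower q == k) with
    | true =>
      have : (PySem.Str.lower q == PySem.Str.lower p) = false := by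
        rw [eq_of_beq hq]
        exact beq_eq_false_iff_ne.mpr hne
      simp [this]
    | false => simp
  rw [List.map_congr_left (fun k hk =>
    congrArg (fun v => (k, v)) (hgroups k hk) :
    ∀ k ∈ PySem.Set.ofList ((t.map PySem.Str.lower).filter (fun x => !(x == PySem.Str.lower p))),
      (fun k => (k, (p :: t).filter (fun q => PySem.Str.lower q == k))) k
        = (fun k => (k, (t.filter (fun q => !(PySem.Str.lower q == PySem.Str.lower p))).filter
            (fun q => PySem.Str.lower q == k))) k)]
  simp only [List.filter_cons, beq_self_eq_true, if_true]
  by_cases hc : 1 < (p :: t.filter (fun q => PySem.Str.lower q == PySem.Str.lower p)).length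
  · rw [if_pos (by simpa using hc), if_pos hc]
    rfl
  · rw [if_neg (by simpa using hc), if_neg hc]
    rfl

-- the loop invariant
lemma pvBLoop_items (out : PySem.Dict String (List String)) (l : List String) :
    (∀ k ∈ l.map PySem.Str.lower, out.contains k = false) →
      (pvBLoop out l).items = out.items ++ pvG l := by
  induction out, l using pvBLoop.induct with
  | case1 out =>
    intro _
    rw [pvBLoop]
    simp [pvG]
  | case2 out p t k same out' ih =>
    intro hfresh
    have hk : out.contains k = false := hfresh k (by simp [k])
    have hout' : out'.items = out.items ++ (if 1 < same.length then [(k, same)] else []) := by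
      show (if _ : 1 < same.length then out.insert k same else out).items
          = out.items ++ (if 1 < same.length then [(k, same)] else [])
      split_ifs with hc
      · rw [PySem.Dict.items_insert_of_not_contains out same hk]
      · simp
    have hfresh' : ∀ k' ∈ ((p :: t).filter (fun q => !(PySem.Str.lower q == k))).map
        PySem.Str.lower, out'.contains k' = false := by
      intro k' hk'
      obtain ⟨q, hq, rfl⟩ := List.mem_map.mp hk'
      have hqf := List.mem_filter.mp hq
      have hne : (PySem.Str.lower q == k) = false := by simpa using hqf.2
      have hcontains : out.contains (PySem.Str.lower q) = false :=
        hfresh _ (List.mem_map.mpr ⟨q, List.mem_of_mem_filter hq, rfl⟩)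
      show (if _ : 1 < same.length then out.insert k same else out).contains
          (PySem.Str.lower q) = false
      split_ifs with hc
      · rw [PySem.Dict.contains_insert]
        simp [hne, hcontains]
      · exact hcontains
    rw [pvBLoop]
    show (pvBLoop out' ((p :: t).filter (fun q => !(PySem.Str.lower q == k)))).items
        = out.items ++ pvG (p :: t)
    rw [ih hfresh', hout', pvG_step p t, List.append_assoc]

lemma pvB_eq_G (paths : List String) : find_case_conflicts_alt paths = pvG paths := by
  unfold find_case_conflicts_alt
  rw [pvBLoop_items PySem.Dict.empty paths (by intro k _; rfl)]
  simp [show (PySem.Dict.empty : PySem.Dict String (List String)).items = [] from rfl]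

-- ===== VERDICT (by name: the statement is the Claim_ definition above) =====
theorem find_case_conflicts_spec : Claim_equal_find_case_conflicts := by
  intro paths _
  unfold Spec_find_case_conflicts
  rw [pvA_eq_G, pvB_eq_G]
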